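-- pv_equiv track=rewrite | github.com/nyagami/Python-PTIT | PY01065 - PHÉP TOÁN CƠ BẢN.py | genn
-- ===== SOURCE A (Python) =====
-- def genn(a):
--     ans = []
--     if a[0] == '?':
--         for i in range(1, 10): ans.append(str(i) + a[1:])
--     else: ans.append(a)
--     r = []
--     if a[1] == '?':
--         for i in ans:
--             for j in range(0, 10): r.append(i[0] + str(j))
--     else: r = ans
--     return r
-- ===== SOURCE B (Python) =====
-- def genn(a):
--     w0, w1 = a[0] == '?', a[1] == '?'
--     if w0 and w1:
--         # both wildcards: the outputs are exactly the decimal strings 10..99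
--         return [str(n) for n in range(10, 100)]
--     if w0:
--         return [str(d) + a[1:] for d in range(1, 10)]
--     if w1:
--         return [a[0] + str(d) for d in range(10)]
--     return [a]
-- ===== Notes on version B (the rewrite author's own statement) =====
-- stated objective: simpler
-- what changed: Replaces A's two staged append-loop passes (expand first char into a list, then re-expand that list) by a flat four-way case analysis in which the double-wildcard case is produced directly as the decimal strings str(10)..str(99), with no intermediate list and no nested loop.
import Mathlib
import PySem

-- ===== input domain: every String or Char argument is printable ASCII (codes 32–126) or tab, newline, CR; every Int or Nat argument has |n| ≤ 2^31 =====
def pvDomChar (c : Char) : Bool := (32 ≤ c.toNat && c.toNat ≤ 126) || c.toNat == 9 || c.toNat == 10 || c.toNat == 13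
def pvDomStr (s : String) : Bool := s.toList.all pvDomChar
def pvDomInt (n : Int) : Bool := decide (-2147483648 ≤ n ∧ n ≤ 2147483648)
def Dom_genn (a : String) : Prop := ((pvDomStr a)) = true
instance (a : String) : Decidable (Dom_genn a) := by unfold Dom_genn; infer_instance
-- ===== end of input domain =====

-- B replaces A's two staged expansion passes by a four-way case analysis whose
-- double-wildcard case is the decimal strings 10..99 directly (objective: simpler).

-- ===== PORT A =====
def genn (a : String) : List String :=
  let ans : List String :=
    if (PySem.Str.pyGet? a 0).getD ' ' = '?' then
      (PySem.List.pyRange 1 10 1).foldl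
        (fun acc i => acc ++ [PySem.Int.toStr i ++ PySem.Str.slice a (some 1) none]) []
    else [a]
  if (PySem.Str.pyGet? a 1).getD ' ' = '?' then
    ans.foldl (fun r i =>
      (PySem.List.pyRange 0 10 1).foldl
        (fun r j => r ++ [String.ofList [(PySem.Str.pyGet? i 0).getD ' '] ++ PySem.Int.toStr j]) r) []
  else ans

-- ===== PORT B =====
def genn_alt (a : String) : List String :=
  if (PySem.Str.pyGet? a 0).getD ' ' = '?' ∧ (PySem.Str.pyGet? a 1).getD ' ' = '?' then
    (PySem.List.pyRange 10 100 1).map PySem.Int.toStr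
  else if (PySem.Str.pyGet? a 0).getD ' ' = '?' then
    (PySem.List.pyRange 1 10 1).map
      (fun d => PySem.Int.toStr d ++ PySem.Str.slice a (some 1) none)
  else if (PySem.Str.pyGet? a 1).getD ' ' = '?' then
    (PySem.List.pyRange 0 10 1).map
      (fun d => String.ofList [(PySem.Str.pyGet? a 0).getD ' '] ++ PySem.Int.toStr d)
  else [a]

-- ===== PRECONDITION & SPEC =====
-- Python A raises IndexError (on a[0] or a[1]) when len(a) < 2; exactly those inputs are excluded.
def Pre_genn (a : String) : Prop := 2 ≤ a.toList.length
instance (a : String) : Decidable (Pre_genn a) := by unfold Pre_genn; infer_instance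
def pvWitness_genn : String := "?4"

def Spec_genn (a : String) (out : List String) : Prop := out = genn_alt a
instance (a : String) (out : List String) : Decidable (Spec_genn a out) := by unfold Spec_genn; infer_instance

-- ===== CLAIM (what is proved, stated in full; the proofs are below) =====
def Claim_equal_genn : Prop := ∀ (a : String), Dom_genn a → Pre_genn a → Spec_genn a (genn a)

-- ===== LEMMAS AND PROOFS =====
theorem str_eq_iff (s t : String) : s = t ↔ s.toList = t.toList :=
  ⟨fun h => by rw [h], fun h => String.toList_injective h⟩

-- ===== VERDICT (by name: the statement is the Claim_ definition above) =====
theorem genn_spec : Claim_equal_genn := by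
  intro a _ hpre
  unfold Pre_genn at hpre
  unfold Spec_genn genn genn_alt
  obtain ⟨c0, c1, rest, hl⟩ : ∃ c0 c1 rest, a.toList = c0 :: c1 :: rest := by
    match h : a.toList with
    | [] => rw [h] at hpre; simp at hpre
    | [x] => rw [h] at hpre; simp at hpre
    | x :: y :: r => exact ⟨x, y, r, rfl⟩
  have h0 : PySem.Str.pyGet? a 0 = some c0 := by
    simp [hl]
  have h1 : PySem.Str.pyGet? a 1 = some c1 := by
    have h := PySem.Str.pyGet?_natCast a 1
    simp only [Nat.cast_one] at h
    rw [h, hl]; rfl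
  have hsl : PySem.Str.slice a (some 1) none = String.ofList (c1 :: rest) := by
    rw [str_eq_iff]
    have := PySem.Str.toList_slice a (some 1) none
    simp [this, PySem.Chars.slice_eq_listSlice, PySem.List.slice_from_one, hl]
  have t1 : PySem.Int.toStr 1 = String.ofList ['1'] := by decide
  have t2 : PySem.Int.toStr 2 = String.ofList ['2'] := by decide
  have t3 : PySem.Int.toStr 3 = String.ofList ['3'] := by decide
  have t4 : PySem.Int.toStr 4 = String.ofList ['4'] := by decide
  have t5 : PySem.Int.toStr 5 = String.ofList ['5'] := by decide
  have t6 : PySem.Int.toStr 6 = String.ofList ['6'] := by decide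
  have t7 : PySem.Int.toStr 7 = String.ofList ['7'] := by decide
  have t8 : PySem.Int.toStr 8 = String.ofList ['8'] := by decide
  have t9 : PySem.Int.toStr 9 = String.ofList ['9'] := by decide
  have hrange9 : PySem.List.pyRange 1 10 1 = [1,2,3,4,5,6,7,8,9] := by decide
  have hrange10 : PySem.List.pyRange 0 10 1 = [0,1,2,3,4,5,6,7,8,9] := by decide
  rw [h0, h1, hrange9, hrange10, hsl]
  by_cases hc0 : c0 = '?' <;> by_cases hc1 : c1 = '?'
  · -- both wildcards: A's nested foldl vs B's decimal strings 10..99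
    simp only [hc0, hc1, Option.getD_some, and_self, if_true, List.foldl,
      t1, t2, t3, t4, t5, t6, t7, t8, t9]
    simp [PySem.Str.pyGet?]
    decide
  · -- first char wildcard only
    simp [hc0, hc1, List.foldl, t1, t2, t3, t4, t5, t6, t7, t8, t9]
  · -- second char wildcard only
    simp [hc0, hc1, List.foldl, hl, PySem.Str.pyGet?]
  · -- no wildcard
    simp [hc0, hc1]
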